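-- pv_equiv track=rewrite | github.com/BARarch/My-Hackerranks | candles200330.py | candles
-- ===== SOURCE A (Python) =====
-- def candles(candlesNumber, makeNew):
--     leftOver = 0
--     burnt = 0
--     while candlesNumber > 0 or leftOver >= makeNew:
--         if leftOver >= makeNew:
--             # Burn LeftOver Candle
--             burnt += 1
--             leftOver = 1
--
--         if candlesNumber > 0:
--             candlesNumber -= 1
--             burnt += 1
--             leftOver += 1
--
--     return burnt
-- ===== SOURCE B (Python) =====
-- def candles(candlesNumber, makeNew):
--     if candlesNumber <= 0:
--         return 0
--     return candlesNumber + (candlesNumber - 1) // (makeNew - 1)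
-- ===== Notes on version B (the rewrite author's own statement) =====
-- stated objective: faster
-- what changed: Replaces the per-candle simulation loop with the closed form N + (N-1)//(makeNew-1), since every exchange of makeNew stubs costs makeNew-1 stubs net.
import Mathlib
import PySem

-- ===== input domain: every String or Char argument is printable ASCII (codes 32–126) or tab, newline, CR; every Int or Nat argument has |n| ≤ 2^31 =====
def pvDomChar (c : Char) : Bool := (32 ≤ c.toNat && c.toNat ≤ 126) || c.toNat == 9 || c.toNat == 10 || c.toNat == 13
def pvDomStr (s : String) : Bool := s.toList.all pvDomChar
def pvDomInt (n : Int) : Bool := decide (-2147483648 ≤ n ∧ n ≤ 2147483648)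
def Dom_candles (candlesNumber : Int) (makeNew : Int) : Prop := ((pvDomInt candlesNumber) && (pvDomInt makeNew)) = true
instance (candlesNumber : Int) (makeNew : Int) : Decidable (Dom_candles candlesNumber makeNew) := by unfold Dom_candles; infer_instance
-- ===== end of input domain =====

-- B replaces A's per-candle simulation loop with the O(1) closed form N + (N-1)//(makeNew-1).


-- ===== PORT A =====
-- A's while loop as fuel recursion over the same state (candlesNumber, leftOver, burnt);
-- the fuel candlesNumber.toNat + 2 bounds the iteration count whenever the Python loop terminates.
def candlesLoop (makeNew : Int) : Nat → Int → Int → Int → Int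
  | 0, _, _, burnt => burnt
  | fuel + 1, candlesNumber, leftOver, burnt =>
    if candlesNumber > 0 ∨ leftOver ≥ makeNew then
      -- the two sequential 'if's of A's body, as nested branches with identical updates
      if leftOver ≥ makeNew then
        if candlesNumber > 0 then
          candlesLoop makeNew fuel (candlesNumber - 1) (1 + 1) (burnt + 1 + 1)
        else
          candlesLoop makeNew fuel candlesNumber 1 (burnt + 1)
      else
        if candlesNumber > 0 then
          candlesLoop makeNew fuel (candlesNumber - 1) (leftOver + 1) (burnt + 1)
        else
          candlesLoop makeNew fuel candlesNumber leftOver burnt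
    else burnt

def candles (candlesNumber : Int) (makeNew : Int) : Int :=
  candlesLoop makeNew (candlesNumber.toNat + 2) candlesNumber 0 0

-- ===== PORT B =====
def candles_alt (candlesNumber : Int) (makeNew : Int) : Int :=
  if candlesNumber ≤ 0 then 0
  else candlesNumber + PySem.Int.floordiv (candlesNumber - 1) (makeNew - 1)

-- ===== PRECONDITION & SPEC =====
-- Pre_ excludes exactly the inputs on which A's while loop never terminates
-- (makeNew ≤ 0, or makeNew = 1 with candlesNumber > 0); A returns on all admitted inputs.
def Pre_candles (candlesNumber : Int) (makeNew : Int) : Prop :=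
  2 ≤ makeNew ∨ (1 ≤ makeNew ∧ candlesNumber ≤ 0)
instance (candlesNumber : Int) (makeNew : Int) : Decidable (Pre_candles candlesNumber makeNew) := by
  unfold Pre_candles; infer_instance

def pvWitness_candles : Int × Int := (7, 3)

def Spec_candles (candlesNumber : Int) (makeNew : Int) (out : Int) : Prop := out = candles_alt candlesNumber makeNew
instance (candlesNumber : Int) (makeNew : Int) (out : Int) : Decidable (Spec_candles candlesNumber makeNew out) := by unfold Spec_candles; infer_instance

-- ===== CLAIM (what is proved, stated in full; the proofs are below) =====
def Claim_equal_candles : Prop := ∀ (candlesNumber : Int) (makeNew : Int), Dom_candles candlesNumber makeNew → Pre_candles candlesNumber makeNew → Spec_candles candlesNumber makeNew (candles candlesNumber makeNew)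

-- ===== LEMMAS AND PROOFS =====

-- Loop invariant: with 2 ≤ m, 0 ≤ c, 0 ≤ lo ≤ m, 1 ≤ c + lo and enough fuel,
-- the loop returns burnt + c + (c + lo - 1) / (m - 1)  (Euclidean = floor division, divisor positive).
theorem candlesLoop_closed (m : Int) (hm : 2 ≤ m) :
    ∀ (fuel : Nat) (c lo b : Int), 0 ≤ c → 0 ≤ lo → lo ≤ m → 1 ≤ c + lo →
      c.toNat + 2 ≤ fuel →
      candlesLoop m fuel c lo b = b + c + (c + lo - 1) / (m - 1) := by
  intro fuel
  induction fuel with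
  | zero => intro c lo b _ _ _ _ hf; omega
  | succ f ih =>
    intro c lo b hc hlo hlom hsum hf
    by_cases hcp : c > 0
    · by_cases hlm : lo ≥ m
      · -- lo = m, c > 0: burn leftover then a fresh candle
        have hrec := ih (c - 1) 2 (b + 2) (by omega) (by omega) hm (by omega) (by omega)
        simp only [candlesLoop]
        rw [if_pos (Or.inl hcp), if_pos hlm, if_pos hcp]
        rw [show (1 + 1 : Int) = 2 from rfl, show b + 1 + 1 = b + 2 by ring, hrec]
        have hlo_eq : lo = m := le_antisymm hlom hlm
        have hdiv : (c + lo - 1) / (m - 1) = (c - 1 + 2 - 1) / (m - 1) + 1 := by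
          have := Int.add_mul_ediv_right (c - 1 + 2 - 1) 1 (show m - 1 ≠ 0 by omega)
          rw [hlo_eq]
          calc (c + m - 1) / (m - 1) = (c - 1 + 2 - 1 + 1 * (m - 1)) / (m - 1) := by ring_nf
            _ = (c - 1 + 2 - 1) / (m - 1) + 1 := this
        omega
      · -- lo < m, c > 0: burn a fresh candle only
        have hrec := ih (c - 1) (lo + 1) (b + 1) (by omega) (by omega) (by omega) (by omega)
          (by omega)
        simp only [candlesLoop]
        rw [if_pos (Or.inl hcp), if_neg hlm, if_pos hcp, hrec]
        have : c - 1 + (lo + 1) - 1 = c + lo - 1 := by ring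
        rw [this]; ring
    · by_cases hlm : lo ≥ m
      · -- c ≤ 0, lo = m: burn the leftover candle, then the loop exits
        obtain ⟨f', rfl⟩ : ∃ f', f = f' + 1 := ⟨f - 1, by omega⟩
        have hc0 : c = 0 := by omega
        have hlo_eq : lo = m := le_antisymm hlom hlm
        simp only [candlesLoop]
        rw [if_pos (Or.inr hlm), if_pos hlm, if_neg hcp]
        rw [if_neg (show ¬ (c > 0 ∨ (1 : Int) ≥ m) by omega), hc0, hlo_eq]
        have : (0 + m - 1) / (m - 1) = 1 := by
          rw [show (0 + m - 1 : Int) = m - 1 by ring]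
          exact Int.ediv_self (by omega)
        omega
      · -- c ≤ 0, lo < m: the loop exits; 1 ≤ lo ≤ m - 1 so the quotient is 0
        have hc0 : c = 0 := by omega
        simp only [candlesLoop]
        rw [if_neg (by omega)]
        have : (c + lo - 1) / (m - 1) = 0 :=
          Int.ediv_eq_zero_of_lt (by omega) (by omega)
        omega

-- ===== VERDICT (by name: the statement is the Claim_ definition above) =====
theorem candles_spec : Claim_equal_candles := by
  intro c m _ hpre
  unfold Spec_candles candles candles_alt
  by_cases hc : c ≤ 0
  · -- no candles: the loop condition is false at once (0 ≥ m fails since 1 ≤ m)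
    have hm1 : 1 ≤ m := by unfold Pre_candles at hpre; omega
    rw [if_pos hc]
    rw [show c.toNat + 2 = 1 + 1 by omega]
    simp only [candlesLoop]
    rw [if_neg (by omega)]
  · have hm : 2 ≤ m := by unfold Pre_candles at hpre; omega
    rw [if_neg hc]
    rw [candlesLoop_closed m hm (c.toNat + 2) c 0 0 (by omega) (by omega) (by omega)
      (by omega) (by omega)]
    rw [PySem.Int.floordiv_eq_ediv_of_pos (by omega)]
    have : c + 0 - 1 = c - 1 := by ring
    rw [this]; ring
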